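-- pv_equiv track=rewrite | github.com/kFTY/foodcount | foodcount.py | clean_words
-- ===== SOURCE A (Python) =====
-- n = 0
--
-- def clean_words(words):
--     save = []
--     i = 1
--     for word in words:
--         if word != '\n':
--             save.append(word)
--             i = 1  # start to have a word
--         else:
--             if i == 1:
--                 save.append('\n')
--                 i = 0
--             else:
--                 i = 0
--     n = 1
--     s = ''
--     while n < len(save):
--         s += str(save[n])
--         n += 1
--     return s
-- ===== SOURCE B (Python) =====
-- def clean_words(words):
--     # split into runs: each newline run collapses to a single '\n',
--     # each non-newline run is kept whole; then join everything after the first element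
--     def collapse(ws):
--         if not ws:
--             return []
--         if ws[0] == '\n':
--             i = 1
--             while i < len(ws) and ws[i] == '\n':
--                 i += 1
--             return ['\n'] + collapse(ws[i:])
--         i = 1
--         while i < len(ws) and ws[i] != '\n':
--             i += 1
--         return ws[:i] + collapse(ws[i:])
--     return ''.join(str(x) for x in collapse(words)[1:])
-- ===== Notes on version B (the rewrite author's own statement) =====
-- stated objective: alternative
-- what changed: Replaced A's per-element flag state machine plus index-based while-concat join with a recursive run-splitter (each newline run collapses to one '\n', word runs are copied whole) followed by a single join over the tail.
import Mathlib
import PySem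

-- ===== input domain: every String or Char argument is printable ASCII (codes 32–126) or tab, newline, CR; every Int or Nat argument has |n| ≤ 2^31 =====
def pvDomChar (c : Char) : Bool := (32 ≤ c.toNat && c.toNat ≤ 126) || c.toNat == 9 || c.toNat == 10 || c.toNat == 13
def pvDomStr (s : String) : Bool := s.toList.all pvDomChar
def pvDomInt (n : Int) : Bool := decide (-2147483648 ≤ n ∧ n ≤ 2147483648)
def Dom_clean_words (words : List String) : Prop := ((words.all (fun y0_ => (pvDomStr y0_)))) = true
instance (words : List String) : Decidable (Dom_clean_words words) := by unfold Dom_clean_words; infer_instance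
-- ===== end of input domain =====

-- B replaces A's per-element flag state machine and index-based join loop with a
-- recursive run-splitter (collapse each newline run to one '\n', keep word runs whole)
-- followed by one join over the tail; alternative decomposition, same cost.

-- ===== PORT A =====
-- the for-loop over words with state (save, i); producing the rest of save by recursion
def saveA : List String → Nat → List String
  | [], _ => []
  | w :: ws, i =>
    if w ≠ "\n" then w :: saveA ws 1
    else if i = 1 then "\n" :: saveA ws 0 else saveA ws 0

-- the trailing 'while n < len(save): s += str(save[n]); n += 1' loop
def loopA (save : List String) (n : Nat) (s : String) : String :=
  if h : n < save.length then loopA save (n + 1) (s ++ save[n]) else s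
  termination_by save.length - n

def clean_words (words : List String) : String :=
  loopA (saveA words 1) 1 ""

-- ===== PORT B =====
-- the recursive run-splitter 'collapse' of Source B (the index scans are take/drop of the run)
def collapseB (ws : List String) : List String :=
  match ws with
  | [] => []
  | w :: rest =>
    if w = "\n" then
      "\n" :: collapseB (rest.dropWhile (· = "\n"))
    else
      w :: rest.takeWhile (· ≠ "\n") ++ collapseB (rest.dropWhile (· ≠ "\n"))
  termination_by ws.length
  decreasing_by
  · exact Nat.lt_succ_of_le (List.length_dropWhile_le _ _)
  · exact Nat.lt_succ_of_le (List.length_dropWhile_le _ _)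

-- ''.join(...)
def joinB : List String → String
  | [] => ""
  | a :: t => a ++ joinB t

def clean_words_alt (words : List String) : String :=
  joinB ((collapseB words).drop 1)

-- ===== PRECONDITION & SPEC =====
def Spec_clean_words (words : List String) (out : String) : Prop := out = clean_words_alt words
instance (words : List String) (out : String) : Decidable (Spec_clean_words words out) := by unfold Spec_clean_words; infer_instance

-- ===== CLAIM (what is proved, stated in full; the proofs are below) =====
def Claim_equal_clean_words : Prop := ∀ (words : List String), Dom_clean_words words → Spec_clean_words words (clean_words words)

-- ===== LEMMAS AND PROOFS =====

-- A's join loop concatenates save[n:]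
theorem loopA_eq (save : List String) (n : Nat) (s : String) :
    loopA save n s = s ++ joinB (save.drop n) := by
  fun_induction loopA save n s with
  | case1 n s h ih =>
    rw [ih, List.drop_eq_getElem_cons h, joinB, String.append_assoc]
  | case2 n s h =>
    rw [List.drop_of_length_le (Nat.le_of_not_lt h), joinB]
    simp

-- after reading a '\n' (i = 0), A skips the rest of the newline run
theorem saveA_zero (l : List String) :
    saveA l 0 = saveA (l.dropWhile (· = "\n")) 1 := by
  induction l with
  | nil => rfl
  | cons w ws ih =>
    by_cases hw : w = "\n"
    · simp [saveA, hw, ih]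
    · simp [saveA, hw]

-- the state machine produces exactly the run-collapsed list
theorem saveA_eq_collapseB : ∀ l : List String, saveA l 1 = collapseB l := by
  intro l
  induction hN : l.length using Nat.strong_induction_on generalizing l with
  | _ N IH =>
    subst hN
    have aux : ∀ ws : List String, ws.length < l.length →
        saveA ws 1 = ws.takeWhile (· ≠ "\n") ++ collapseB (ws.dropWhile (· ≠ "\n")) := by
      intro ws
      induction ws with
      | nil => intro _; simp [saveA, collapseB]
      | cons v vs ih =>
        intro hlt
        by_cases hv : v = "\n"
        · have : saveA (v :: vs) 1 = "\n" :: saveA vs 0 := by simp [saveA, hv]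
          rw [this, saveA_zero]
          have hvs : (vs.dropWhile (· = "\n")).length < l.length :=
            Nat.lt_of_le_of_lt (List.length_dropWhile_le _ _)
              (Nat.lt_of_succ_lt_succ (Nat.lt_succ_of_lt hlt))
          rw [IH _ hvs _ rfl]
          simp [hv, collapseB]
        · have h1 : saveA (v :: vs) 1 = v :: saveA vs 1 := by simp [saveA, hv]
          rw [h1, ih (Nat.lt_of_succ_lt hlt)]
          simp [hv]
    match l, IH, aux with
    | [], _, _ => simp [saveA, collapseB]
    | w :: ws, IH, aux =>
      by_cases hw : w = "\n"
      · have h1 : saveA (w :: ws) 1 = "\n" :: saveA ws 0 := by simp [saveA, hw]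
        have hws : (ws.dropWhile (· = "\n")).length < (w :: ws).length :=
          Nat.lt_succ_of_le (List.length_dropWhile_le _ _)
        rw [h1, saveA_zero, IH _ hws _ rfl, collapseB, if_pos hw]
      · have h1 : saveA (w :: ws) 1 = w :: saveA ws 1 := by simp [saveA, hw]
        rw [h1, aux ws (Nat.lt_succ_self _), collapseB, if_neg hw, List.cons_append]

-- ===== VERDICT (by name: the statement is the Claim_ definition above) =====
theorem clean_words_spec : Claim_equal_clean_words := by
  intro words _
  unfold Spec_clean_words clean_words clean_words_alt
  rw [loopA_eq, saveA_eq_collapseB]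
  rfl
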